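-- pv_equiv track=rewrite | github.com/Alan-Cao-ShengJin/Consensus-1 | replay_diagnostics.py | _extract_ticker_from_warning
-- ===== SOURCE A (Python) =====
-- from typing import Optional
--
-- def _extract_ticker_from_warning(warning: str) -> Optional[str]:
--     """Extract ticker from warning like 'Candidate NVDA: ...' or 'Holding NVDA: ...'."""
--     for prefix in ("Candidate ", "Holding "):
--         if warning.startswith(prefix):
--             rest = warning[len(prefix):]
--             colon = rest.find(":")
--             if colon > 0:
--                 return rest[:colon]
--     return None
-- ===== SOURCE B (Python) =====
-- from typing import Optional
--
-- def _extract_ticker_from_warning(warning: str) -> Optional[str]: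
--     """Split at the first colon, then at the first space, instead of scanning per prefix."""
--     head, sep, _ = warning.partition(":")
--     if sep:
--         word, space, ticker = head.partition(" ")
--         if space and word in ("Candidate", "Holding") and ticker:
--             return ticker
--     return None
-- ===== Notes on version B (the rewrite author's own statement) =====
-- stated objective: simpler
-- what changed: Instead of looping over the two prefixes and re-scanning for the colon after each, B partitions the string once at the first colon and once at the first space, then checks that the first word is one of the two keywords and that the remainder before the colon is non-empty.
import Mathlib
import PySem

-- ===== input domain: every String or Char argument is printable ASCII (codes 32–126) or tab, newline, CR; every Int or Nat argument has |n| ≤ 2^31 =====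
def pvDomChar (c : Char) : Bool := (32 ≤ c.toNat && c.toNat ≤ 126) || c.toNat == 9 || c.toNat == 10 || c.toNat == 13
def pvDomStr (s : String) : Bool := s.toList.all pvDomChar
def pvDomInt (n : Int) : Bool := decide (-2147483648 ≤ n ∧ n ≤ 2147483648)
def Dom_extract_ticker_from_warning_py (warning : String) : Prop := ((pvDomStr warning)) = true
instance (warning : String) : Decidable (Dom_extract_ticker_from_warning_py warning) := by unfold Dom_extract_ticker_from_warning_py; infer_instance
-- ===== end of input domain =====

-- B splits once at the first colon and once at the first space instead of A's per-prefix scan; objective: simpler.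

-- ===== PORT A =====
-- the 'for prefix in ("Candidate ", "Holding ")' loop, step for step
def pvLoopA (w : List Char) : List (List Char) → Option (List Char)
  | [] => none
  | p :: ps =>
    if PySem.Chars.startswith w p then
      let rest := PySem.Chars.slice w (some (p.length : Int)) none
      let colon := PySem.Chars.find rest [':']
      if 0 < colon then some (PySem.Chars.slice rest none (some colon))
      else pvLoopA w ps
    else pvLoopA w ps

def extract_ticker_from_warning_py (warning : String) : Option String :=
  (pvLoopA warning.toList ["Candidate ".toList, "Holding ".toList]).map String.ofList

-- ===== PORT B =====
-- hand port of str.partition(sep): exact for sep ≠ "" (PySem.Chars.find is Python's str.find)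
def pvPartition (s sep : List Char) : List Char × List Char × List Char :=
  let i := PySem.Chars.find s sep
  if i < 0 then (s, [], []) else (s.take i.toNat, sep, s.drop (i.toNat + sep.length))

def pvCoreB (w : List Char) : Option (List Char) :=
  let p1 := pvPartition w [':']
  if p1.2.1 ≠ [] then
    let p2 := pvPartition p1.1 [' ']
    if p2.2.1 ≠ [] ∧ (p2.1 = "Candidate".toList ∨ p2.1 = "Holding".toList) ∧ p2.2.2 ≠ []
    then some p2.2.2 else none
  else none

def extract_ticker_from_warning_py_alt (warning : String) : Option String :=
  (pvCoreB warning.toList).map String.ofList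

-- ===== PRECONDITION & SPEC =====
def Spec_extract_ticker_from_warning_py (warning : String) (out : Option String) : Prop := out = extract_ticker_from_warning_py_alt warning
instance (warning : String) (out : Option String) : Decidable (Spec_extract_ticker_from_warning_py warning out) := by unfold Spec_extract_ticker_from_warning_py; infer_instance

-- ===== CLAIM (what is proved, stated in full; the proofs are below) =====
def Claim_equal_extract_ticker_from_warning_py : Prop := ∀ (warning : String), Dom_extract_ticker_from_warning_py warning → Spec_extract_ticker_from_warning_py warning (extract_ticker_from_warning_py warning)

-- ===== LEMMAS AND PROOFS =====

lemma pv_singleton_prefix (c : Char) (l : List Char) : [c] <+: l ↔ l.head? = some c := by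
  cases l <;> simp [List.prefix_cons_iff, eq_comm]

lemma pv_find_char_neg (s : List Char) (c : Char) (h : c ∉ s) : PySem.Chars.find s [c] = -1 := by
  rw [PySem.Chars.find_eq_neg_one_iff, List.singleton_infix_iff]; exact h

lemma pv_find_char_eq (s : List Char) (c : Char) (n : Nat)
    (h1 : s[n]? = some c) (h2 : ∀ i < n, s[i]? ≠ some c) :
    PySem.Chars.find s [c] = (n : Int) := by
  have hmem : c ∈ s := List.mem_of_getElem? h1
  have h0 : 0 ≤ PySem.Chars.find s [c] := by
    rw [PySem.Chars.find_nonneg_iff, List.singleton_infix_iff]; exact hmem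
  obtain ⟨hp, hmin⟩ := PySem.Chars.find_spec h0
  rw [pv_singleton_prefix, List.head?_drop] at hp
  have heq : (PySem.Chars.find s [c]).toNat = n := by
    rcases lt_trichotomy (PySem.Chars.find s [c]).toNat n with h | h | h
    · exact absurd hp (h2 _ h)
    · exact h
    · have := hmin n h
      rw [pv_singleton_prefix, List.head?_drop] at this
      exact absurd h1 this
  omega

lemma pv_find_char_found (s : List Char) (c : Char) (h : c ∈ s) :
    ∃ j : Nat, PySem.Chars.find s [c] = (j : Int) ∧ j < s.length ∧ s[j]? = some c ∧
      ∀ i < j, s[i]? ≠ some c := by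
  have h0 : 0 ≤ PySem.Chars.find s [c] := by
    rw [PySem.Chars.find_nonneg_iff, List.singleton_infix_iff]; exact h
  obtain ⟨hp, hmin⟩ := PySem.Chars.find_spec h0
  rw [pv_singleton_prefix, List.head?_drop] at hp
  refine ⟨(PySem.Chars.find s [c]).toNat, by omega, ?_, hp, ?_⟩
  · exact (List.getElem?_eq_some_iff.mp hp).1
  · intro i hi
    have := hmin i hi
    rw [pv_singleton_prefix, List.head?_drop] at this
    exact this

lemma pv_partition_neg (s sep : List Char) (h : PySem.Chars.find s sep < 0) :
    pvPartition s sep = (s, [], []) := by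
  simp [pvPartition, h]

lemma pv_partition_nonneg (s sep : List Char) (h : 0 ≤ PySem.Chars.find s sep) :
    pvPartition s sep =
      (s.take (PySem.Chars.find s sep).toNat, sep,
       s.drop ((PySem.Chars.find s sep).toNat + sep.length)) := by
  simp [pvPartition, not_lt.mpr h]

-- B on an input of the shape word ++ ' ' :: t, with word one of the two keywords
lemma pvCoreB_prefix (word t : List Char)
    (hsp : ' ' ∉ word) (hco : ':' ∉ word)
    (hmem : word = "Candidate".toList ∨ word = "Holding".toList) :
    pvCoreB (word ++ ' ' :: t) =
      if 0 < PySem.Chars.find t [':'] then some (t.take (PySem.Chars.find t [':']).toNat)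
      else none := by
  by_cases hct : ':' ∈ t
  · obtain ⟨j, hfj, hjlt, hj, hjmin⟩ := pv_find_char_found t ':' hct
    have hw : PySem.Chars.find (word ++ ' ' :: t) [':'] = ((word.length + 1 + j : Nat) : Int) := by
      apply pv_find_char_eq
      · rw [List.getElem?_append_right (by omega)]
        have h1 : word.length + 1 + j - word.length = j + 1 := by omega
        rw [h1]; simpa using hj
      · intro i hi
        by_cases hi1 : i < word.length
        · rw [List.getElem?_append_left hi1]
          intro hcon; exact hco (List.mem_of_getElem? hcon)
        · rw [List.getElem?_append_right (by omega)]
          by_cases hi2 : i = word.length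
          · subst hi2; simp
          · have h1 : i - word.length = (i - word.length - 1) + 1 := by omega
            rw [h1]
            simpa using hjmin (i - word.length - 1) (by omega)
    have hhead : (word ++ ' ' :: t).take (word.length + 1 + j) = word ++ ' ' :: t.take j := by
      rw [List.take_append, List.take_of_length_le (by omega)]
      congr 1
      have h1 : word.length + 1 + j - word.length = j + 1 := by omega
      rw [h1, List.take_succ_cons]
    have hgw : PySem.Chars.find (word ++ ' ' :: t.take j) [' '] = ((word.length : Nat) : Int) := by
      apply pv_find_char_eq
      · rw [List.getElem?_append_right (le_refl _)]; simp
      · intro i hi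
        rw [List.getElem?_append_left hi]
        intro hcon; exact hsp (List.mem_of_getElem? hcon)
    have hword : (word ++ ' ' :: t.take j).take word.length = word := List.take_left
    have hticker : (word ++ ' ' :: t.take j).drop (word.length + 1) = t.take j := by
      rw [List.drop_append, List.drop_eq_nil_of_le (by omega), List.nil_append]
      have h1 : word.length + 1 - word.length = 1 := by omega
      rw [h1]
      simp
    have h0w : (0 : Int) ≤ PySem.Chars.find (word ++ ' ' :: t) [':'] := by
      rw [hw]; exact Int.natCast_nonneg _
    have h0g : (0 : Int) ≤ PySem.Chars.find (word ++ ' ' :: t.take j) [' '] := by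
      rw [hgw]; exact Int.natCast_nonneg _
    simp only [pvCoreB, pv_partition_nonneg _ _ h0w, hw, Int.toNat_natCast,
      List.length_singleton, hhead]
    rw [if_pos (by decide : ([':'] : List Char) ≠ [])]
    simp only [pv_partition_nonneg _ _ h0g, hgw, Int.toNat_natCast, List.length_singleton,
      hword, hticker]
    rw [hfj]
    by_cases hj0 : j = 0
    · subst hj0
      rw [if_neg (by rintro ⟨-, -, h⟩; exact h rfl), if_neg (by norm_num)]
    · have htk : t.take j ≠ [] := by
        intro hnil
        have hlen := congrArg List.length hnil
        rw [List.length_take] at hlen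
        simp only [List.length_nil] at hlen
        omega
      rw [if_pos ⟨by decide, hmem, htk⟩, if_pos (by exact_mod_cast Nat.pos_of_ne_zero hj0)]
      simp
  · have hcw : ':' ∉ word ++ ' ' :: t := by simp [hco, hct]
    have hneg : PySem.Chars.find (word ++ ' ' :: t) [':'] < 0 := by
      rw [pv_find_char_neg _ _ hcw]; omega
    simp [pvCoreB, pv_partition_neg _ _ hneg, pv_find_char_neg _ _ hct]

-- B returns none when neither "Candidate " nor "Holding " is a prefix
lemma pvCoreB_none (w : List Char)
    (h1 : ¬ "Candidate ".toList <+: w) (h2 : ¬ "Holding ".toList <+: w) :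
    pvCoreB w = none := by
  by_cases hf : PySem.Chars.find w [':'] < 0
  · simp [pvCoreB, pv_partition_neg _ _ hf]
  · have hf' : (0 : Int) ≤ PySem.Chars.find w [':'] := by omega
    simp only [pvCoreB, pv_partition_nonneg _ _ hf', List.length_singleton]
    rw [if_pos (by decide : ([':'] : List Char) ≠ [])]
    set hd := w.take (PySem.Chars.find w [':']).toNat with hhd
    have hhdpre : hd <+: w := List.take_prefix _ _
    by_cases hg : PySem.Chars.find hd [' '] < 0
    · simp [pv_partition_neg _ _ hg]
    · have hg' : (0 : Int) ≤ PySem.Chars.find hd [' '] := by omega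
      simp only [pv_partition_nonneg _ _ hg', List.length_singleton]
      set g := (PySem.Chars.find hd [' ']).toNat with hgdef
      have hgfound : hd[g]? = some ' ' := by
        obtain ⟨hp, -⟩ := PySem.Chars.find_spec hg'
        rw [pv_singleton_prefix, List.head?_drop] at hp
        exact hp
      have hglt : g < hd.length := (List.getElem?_eq_some_iff.mp hgfound).1
      have hval : hd[g]'hglt = ' ' := (List.getElem?_eq_some_iff.mp hgfound).2
      have hdecomp : hd = hd.take g ++ ' ' :: hd.drop (g + 1) := by
        conv_lhs => rw [← List.take_append_drop g hd]
        rw [List.drop_eq_getElem_cons hglt, hval]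
      have hprefix : ∀ kw : List Char, hd.take g = kw → (kw ++ [' ']) <+: w := by
        intro kw hkw
        refine List.IsPrefix.trans ?_ hhdpre
        refine ⟨hd.drop (g + 1), ?_⟩
        rw [← hkw]
        conv_rhs => rw [hdecomp]
        simp
      split
      · next hcond =>
          exfalso
          obtain ⟨-, hor, -⟩ := hcond
          rcases hor with hC | hH
          · exact h1 (by
              rw [show "Candidate ".toList = "Candidate".toList ++ [' '] from by decide]
              exact hprefix _ hC)
          · exact h2 (by
              rw [show "Holding ".toList = "Holding".toList ++ [' '] from by decide]
              exact hprefix _ hH)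
      · rfl

lemma pvCore_eq (w : List Char) :
    pvLoopA w ["Candidate ".toList, "Holding ".toList] = pvCoreB w := by
  by_cases h1 : "Candidate ".toList <+: w
  · obtain ⟨t, rfl⟩ := h1
    have hsplit : "Candidate ".toList ++ t = "Candidate".toList ++ ' ' :: t := by
      rw [show "Candidate ".toList = "Candidate".toList ++ [' '] from by decide,
        List.append_assoc]
      rfl
    have hB := pvCoreB_prefix ("Candidate".toList) t (by decide) (by decide) (Or.inl rfl)
    rw [← hsplit] at hB
    rw [hB]
    have hsw : PySem.Chars.startswith ("Candidate ".toList ++ t) ("Candidate ".toList) = true :=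
      (PySem.Chars.startswith_iff _ _).mpr ⟨t, rfl⟩
    have hnotH : PySem.Chars.startswith ("Candidate ".toList ++ t) ("Holding ".toList) = false := by
      refine Bool.eq_false_iff.mpr ?_
      intro hpre
      rw [PySem.Chars.startswith_iff,
        show "Candidate ".toList = 'C' :: "andidate ".toList from by decide,
        show "Holding ".toList = 'H' :: "olding ".toList from by decide, List.cons_append,
        List.cons_prefix_cons] at hpre
      simp at hpre
    simp only [pvLoopA, hsw]
    rw [if_pos trivial]
    simp only [PySem.Chars.slice_eq_listSlice, PySem.List.slice_from_natCast, List.drop_left]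
    by_cases hc : 0 < PySem.Chars.find t [':']
    · rw [if_pos hc, if_pos hc, PySem.List.slice_to _ (le_of_lt hc)]
    · rw [if_neg hc, if_neg hc]
      simp only [hnotH, Bool.false_eq_true, if_false]
  · by_cases h2 : "Holding ".toList <+: w
    · obtain ⟨t, rfl⟩ := h2
      have hsplit : "Holding ".toList ++ t = "Holding".toList ++ ' ' :: t := by
        rw [show "Holding ".toList = "Holding".toList ++ [' '] from by decide,
          List.append_assoc]
        rfl
      have hB := pvCoreB_prefix ("Holding".toList) t (by decide) (by decide) (Or.inr rfl)
      rw [← hsplit] at hB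
      rw [hB]
      have hsw : PySem.Chars.startswith ("Holding ".toList ++ t) ("Holding ".toList) = true :=
        (PySem.Chars.startswith_iff _ _).mpr ⟨t, rfl⟩
      have hnotC : PySem.Chars.startswith ("Holding ".toList ++ t) ("Candidate ".toList) = false := by
        refine Bool.eq_false_iff.mpr ?_
        intro hpre
        rw [PySem.Chars.startswith_iff,
          show "Holding ".toList = 'H' :: "olding ".toList from by decide,
          show "Candidate ".toList = 'C' :: "andidate ".toList from by decide, List.cons_append,
          List.cons_prefix_cons] at hpre
        simp at hpre
      simp only [pvLoopA, hnotC, Bool.false_eq_true]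
      rw [if_neg (by simp)]
      simp only [hsw]
      rw [if_pos trivial]
      simp only [PySem.Chars.slice_eq_listSlice, PySem.List.slice_from_natCast, List.drop_left]
      by_cases hc : 0 < PySem.Chars.find t [':']
      · rw [if_pos hc, if_pos hc, PySem.List.slice_to _ (le_of_lt hc)]
      · rw [if_neg hc, if_neg hc]
    · have hnc : PySem.Chars.startswith w ("Candidate ".toList) = false :=
        Bool.eq_false_iff.mpr (fun hp => h1 ((PySem.Chars.startswith_iff _ _).mp hp))
      have hnh : PySem.Chars.startswith w ("Holding ".toList) = false :=
        Bool.eq_false_iff.mpr (fun hp => h2 ((PySem.Chars.startswith_iff _ _).mp hp))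
      simp only [pvLoopA, hnc, hnh, Bool.false_eq_true, if_false]
      exact (pvCoreB_none w h1 h2).symm

-- ===== VERDICT (by name: the statement is the Claim_ definition above) =====
theorem extract_ticker_from_warning_py_spec : Claim_equal_extract_ticker_from_warning_py := by
  intro warning _
  unfold Spec_extract_ticker_from_warning_py extract_ticker_from_warning_py
    extract_ticker_from_warning_py_alt
  rw [pvCore_eq]
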